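-- pv_equiv track=rewrite | github.com/pypi-data/pypi-mirror-402 | packages/recursive-cleaner/recursive_cleaner-0.6.1-py3-none-any.whl/recursive_cleaner/output.py | consolidate_imports
-- ===== SOURCE A (Python) =====
-- def consolidate_imports(imports: list[str]) -> list[str]:
--     """
--     Consolidate and deduplicate imports.
--
--     - Duplicate `import x` → single `import x`
--     - `from x import a` + `from x import b` → `from x import a, b`
--     - `import x` + `from x import y` → both kept (different forms)
--
--     Args:
--         imports: Raw import statements from all functions
--
--     Returns:
--         Consolidated, sorted import statements
--     """
--     # Track regular imports (import x, import x.y)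
--     regular_imports: set[str] = set()
--
--     # Track from imports: module -> set of names
--     from_imports: dict[str, set[str]] = {}
--
--     for imp in imports:
--         imp = imp.strip()
--         if imp.startswith("from "):
--             # Parse: from module import name1, name2
--             try:
--                 # Split "from module import names"
--                 rest = imp[5:]  # Remove "from "
--                 module, names_part = rest.split(" import ", 1)
--                 module = module.strip()
--                 # Parse names (handle "a, b, c" and "a as alias")
--                 names = [n.strip() for n in names_part.split(",")]
--                 if module not in from_imports:
--                     from_imports[module] = set()
--                 from_imports[module].update(names)
--             except ValueError:
--                 # Malformed import, keep as-is
--                 regular_imports.add(imp)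
--         elif imp.startswith("import "):
--             regular_imports.add(imp)
--
--     # Build result
--     result = []
--
--     # Add regular imports (sorted)
--     result.extend(sorted(regular_imports))
--
--     # Add consolidated from imports (sorted by module, then by names)
--     for module in sorted(from_imports.keys()):
--         names = sorted(from_imports[module])
--         result.append(f"from {module} import {', '.join(names)}")
--
--     return result
-- ===== SOURCE B (Python) =====
-- from itertools import groupby
--
--
-- def _parse_from(imp):
--     """Return the (module, name) pairs of a well-formed from-import, else None."""
--     parts = imp[5:].split(" import ", 1)
--     if len(parts) != 2:
--         return None
--     module, names_part = parts
--     return [(module.strip(), n.strip()) for n in names_part.split(",")]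
--
--
-- def consolidate_imports(imports):
--     stripped = [imp.strip() for imp in imports]
--     parsed = [(imp, _parse_from(imp) if imp.startswith("from ") else None)
--               for imp in stripped]
--     regular = sorted({imp for imp, p in parsed
--                       if (imp.startswith("from ") and p is None)
--                       or (not imp.startswith("from ") and imp.startswith("import "))})
--     pairs = sorted({pr for _, p in parsed if p is not None for pr in p})
--     return regular + [f"from {m} import {', '.join(n for _, n in grp)}"
--                       for m, grp in groupby(pairs, key=lambda p: p[0])]
-- ===== Notes on version B (the rewrite author's own statement) =====
-- stated objective: alternative
-- what changed: Replaces the stateful parse loop over a module->set dict with a comprehension-style pipeline: each line is classified once, from-imports are flattened to (module, name) pairs, and the consolidated lines are produced by sorting the deduplicated pairs lexicographically and grouping adjacent modules with itertools.groupby; it trades the dict aggregation for sort+groupby.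
import Mathlib
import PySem

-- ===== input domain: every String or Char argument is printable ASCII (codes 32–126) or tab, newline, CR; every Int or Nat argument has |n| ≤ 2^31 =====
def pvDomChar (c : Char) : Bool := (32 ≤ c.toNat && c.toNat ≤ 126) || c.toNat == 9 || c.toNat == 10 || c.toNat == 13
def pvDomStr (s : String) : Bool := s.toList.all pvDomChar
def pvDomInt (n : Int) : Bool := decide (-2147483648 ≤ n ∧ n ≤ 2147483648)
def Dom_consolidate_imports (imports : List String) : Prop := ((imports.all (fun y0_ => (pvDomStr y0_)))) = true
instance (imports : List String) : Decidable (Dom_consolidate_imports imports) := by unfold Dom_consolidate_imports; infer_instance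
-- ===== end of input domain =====

-- B consolidates from-imports by sorting deduplicated (module, name) pairs and grouping
-- adjacent modules (itertools.groupby) instead of A's module->set dict; same return value.

-- ===== PORT A =====
-- A's loop body: strip the line, dispatch on "from "/"import ", collect regular imports
-- in a set and from-import names in a dict of sets (ValueError on unpack = malformed).
def ciStepA (st : PySem.Set String × PySem.Dict String (PySem.Set String)) (imp0 : String) :
    PySem.Set String × PySem.Dict String (PySem.Set String) :=
  let imp := PySem.Str.strip imp0
  if PySem.Str.startswith imp "from " then
    -- rest.split(" import ", 1): separator is non-empty, so splitMax? is always `some`;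
    -- the 2-tuple unpack raises ValueError exactly when the result is not 2 pieces.
    match PySem.Str.splitMax? (PySem.Str.slice imp (some 5) none) " import " 1 with
    | some [module0, namesPart] =>
        let module := PySem.Str.strip module0
        -- names_part.split(","): non-empty separator, split? is always `some`
        let names := ((PySem.Str.split? namesPart ",").getD []).map (fun n => PySem.Str.strip n)
        (st.1, st.2.modify module PySem.Set.empty (fun s => PySem.Set.update s names))
    | _ => (PySem.Set.add st.1 imp, st.2)   -- except ValueError: keep as-is
  else if PySem.Str.startswith imp "import " then
    (PySem.Set.add st.1 imp, st.2)
  else st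

def consolidate_imports (imports : List String) : List String :=
  let st := imports.foldl ciStepA (PySem.Set.empty, PySem.Dict.empty)
  PySem.List.sorted st.1 (fun x => x) false ++
    (PySem.List.sorted st.2.keys (fun x => x) false).map (fun module =>
      PySem.Str.join "" ["from ", module, " import ",
        PySem.Str.join ", " (PySem.List.sorted (st.2.getD module PySem.Set.empty) (fun x => x) false)])

-- ===== PORT B =====
-- _parse_from: the (module, name) pairs of a well-formed from-import, else none
def ciParseFrom (imp : String) : Option (List (String × String)) :=
  match PySem.Str.splitMax? (PySem.Str.slice imp (some 5) none) " import " 1 with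
  | some [module, namesPart] =>
      some (((PySem.Str.split? namesPart ",").getD []).map
        (fun n => (PySem.Str.strip module, PySem.Str.strip n)))
  | _ => none

-- itertools.groupby (keyed by fst, values projected to snd): groups ADJACENT equal modules
def ciGroupRuns : List (String × String) → List (String × List String)
  | [] => []
  | (m, n) :: rest =>
    match ciGroupRuns rest with
    | (m', ns) :: gs => if m = m' then (m, n :: ns) :: gs else (m, [n]) :: (m', ns) :: gs
    | [] => [(m, [n])]

def consolidate_imports_alt (imports : List String) : List String :=
  let stripped := imports.map PySem.Str.strip
  let parsed := stripped.map (fun imp =>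
    (imp, if PySem.Str.startswith imp "from " then ciParseFrom imp else none))
  let regular := PySem.List.sorted (PySem.Set.ofList (parsed.filterMap (fun ip =>
    if (PySem.Str.startswith ip.1 "from " && ip.2.isNone)
        || (!PySem.Str.startswith ip.1 "from " && PySem.Str.startswith ip.1 "import ")
    then some ip.1 else none))) (fun x => x) false
  let pairs := PySem.List.sorted2
    (PySem.Set.ofList (parsed.flatMap (fun ip => ip.2.getD []))) Prod.fst Prod.snd false
  regular ++ (ciGroupRuns pairs).map (fun g =>
    PySem.Str.join "" ["from ", g.1, " import ", PySem.Str.join ", " g.2])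

-- ===== PRECONDITION & SPEC =====
def Spec_consolidate_imports (imports : List String) (out : List String) : Prop := out = consolidate_imports_alt imports
instance (imports : List String) (out : List String) : Decidable (Spec_consolidate_imports imports out) := by unfold Spec_consolidate_imports; infer_instance

-- ===== CLAIM (what is proved, stated in full; the proofs are below) =====
def Claim_equal_consolidate_imports : Prop := ∀ (imports : List String), Dom_consolidate_imports imports → Spec_consolidate_imports imports (consolidate_imports imports)

-- ===== LEMMAS AND PROOFS =====

-- Proof-only abbreviations: the per-line classification both loops perform, and the
-- dict-building step of A's aggregation.
def ciRegSel (imp0 : String) : Option String :=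
  let imp := PySem.Str.strip imp0
  if (PySem.Str.startswith imp "from " &&
      (if PySem.Str.startswith imp "from " then ciParseFrom imp else none).isNone)
      || (!PySem.Str.startswith imp "from " && PySem.Str.startswith imp "import ")
  then some imp else none

def ciPairSel (imp0 : String) : List (String × String) :=
  let imp := PySem.Str.strip imp0
  (if PySem.Str.startswith imp "from " then ciParseFrom imp else none).getD []

def ciStepD (d : PySem.Dict String (PySem.Set String)) (p : String × String) :
    PySem.Dict String (PySem.Set String) :=
  d.modify p.1 PySem.Set.empty (fun s => PySem.Set.add s p.2)

-- the from-import names collected for module m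
def ciNames (prs : List (String × String)) (m : String) : PySem.Set String :=
  PySem.Set.ofList ((prs.filter (fun p => p.1 == m)).map Prod.snd)

def ciExpand (g : List (String × List String)) : List (String × String) :=
  g.flatMap (fun g => g.2.map (fun n => (g.1, n)))
lemma set_update_cons {α : Type} [BEq α] (s : PySem.Set α) (a : α) (l : List α) :
    PySem.Set.update s (a :: l) = PySem.Set.update (PySem.Set.add s a) l := by
  simp [PySem.Set.update]

lemma go_ne_nil (sep : List Char) (fuel : Nat) : ∀ l cur acc, PySem.Chars.splitOn.go sep fuel l cur acc ≠ [] := by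
  induction fuel with
  | zero => intro l cur acc; rw [PySem.Chars.splitOn.go.eq_def]; simp
  | succ n ih =>
    intro l cur acc
    rw [PySem.Chars.splitOn.go.eq_def]
    cases l with
    | nil => simp
    | cons c rest => dsimp only; split_ifs <;> exact ih _ _ _

lemma split?_getD_ne_nil (s : String) : ((PySem.Str.split? s ",").getD []) ≠ [] := by
  simp [PySem.Str.split?, PySem.Chars.split?, PySem.Chars.splitOn]
  exact go_ne_nil _ _ _ _ _

lemma modify_modify_self {κ ν : Type} [BEq κ] [LawfulBEq κ]
    (d : PySem.Dict κ ν) (k : κ) (d0 : ν) (f g : ν → ν) :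
    (d.modify k d0 g).modify k d0 f = d.modify k d0 (fun v => f (g v)) := by
  simp [PySem.Dict.modify.eq_1, PySem.Dict.getD_insert_self, PySem.Dict.insert_insert_self]

lemma modify_update_eq_foldl (d : PySem.Dict String (PySem.Set String)) (m : String)
    (ns : List String) (hns : ns ≠ []) :
    d.modify m PySem.Set.empty (fun s => PySem.Set.update s ns)
      = ns.foldl (fun d n => d.modify m PySem.Set.empty (fun s => PySem.Set.add s n)) d := by
  induction ns generalizing d with
  | nil => exact absurd rfl hns
  | cons n rest ih =>
    cases rest with
    | nil => simp [PySem.Set.update]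
    | cons b t =>
      rw [List.foldl_cons, ← ih _ (by simp), modify_modify_self]
      congr 1

lemma stepA_eq (st : PySem.Set String × PySem.Dict String (PySem.Set String)) (imp0 : String) :
    ciStepA st imp0 =
      ((match ciRegSel imp0 with | some r => PySem.Set.add st.1 r | none => st.1),
       (ciPairSel imp0).foldl ciStepD st.2) := by
  unfold ciStepA ciRegSel ciPairSel ciParseFrom
  dsimp only
  cases hf : PySem.Str.startswith (PySem.Str.strip imp0) "from " with
  | false =>
    simp only [Bool.false_eq_true, if_false, Bool.false_and, Bool.not_false, Bool.true_and,
      Bool.false_or, Option.isNone_none, Option.getD_none]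
    cases hi : PySem.Str.startswith (PySem.Str.strip imp0) "import " with
    | false => simp only [Bool.false_eq_true, if_false]; rfl
    | true => simp only [if_true]; rfl
  | true =>
    simp only [Bool.true_and, Bool.not_true, Bool.false_and, Bool.or_false, if_true]
    rcases h : PySem.Str.splitMax? (PySem.Str.slice (PySem.Str.strip imp0) (some 5) none) " import " 1
      with _ | (_ | ⟨a, _ | ⟨b, _ | t⟩⟩)
    · rfl
    · rfl
    · rfl
    · simp only [Option.isNone_some, Bool.false_eq_true, if_false, Option.getD_some]
      refine Prod.ext rfl ?_
      dsimp only
      rw [modify_update_eq_foldl _ _ _ (by simpa using split?_getD_ne_nil b)]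
      simp only [List.foldl_map, ciStepD]
    · rfl

lemma foldA_eq (xs : List String) (r : PySem.Set String)
    (d : PySem.Dict String (PySem.Set String)) :
    xs.foldl ciStepA (r, d)
      = (PySem.Set.update r (xs.filterMap ciRegSel),
         (xs.flatMap ciPairSel).foldl ciStepD d) := by
  induction xs generalizing r d with
  | nil => simp [PySem.Set.update]
  | cons x xs ih =>
    rw [List.foldl_cons, stepA_eq, ih, List.filterMap_cons, List.flatMap_cons,
      List.foldl_append]
    cases h : ciRegSel x with
    | none => rfl
    | some v => rw [set_update_cons]

lemma getD_foldD (prs : List (String × String)) (d : PySem.Dict String (PySem.Set String))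
    (m : String) :
    (prs.foldl ciStepD d).getD m PySem.Set.empty
      = PySem.Set.update (d.getD m PySem.Set.empty)
          ((prs.filter (fun p => p.1 == m)).map Prod.snd) := by
  induction prs generalizing d with
  | nil => simp [PySem.Set.update]
  | cons p rest ih =>
    rw [List.foldl_cons, ih, List.filter_cons]
    by_cases hm : p.1 = m
    · simp only [hm, beq_self_eq_true, if_pos, List.map_cons]
      rw [set_update_cons]
      unfold ciStepD
      rw [hm, PySem.Dict.getD_modify_self]
    · have : (p.1 == m) = false := beq_eq_false_iff_ne.mpr hm
      simp only [this, Bool.false_eq_true, if_false]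
      unfold ciStepD
      rw [PySem.Dict.getD_modify_of_ne _ _ _ (Ne.symm hm)]

lemma fst_mem_groupRuns (l : List (String × String)) (g : String × List String)
    (hg : g ∈ ciGroupRuns l) : g.1 ∈ l.map Prod.fst := by
  induction l generalizing g with
  | nil => simp [ciGroupRuns] at hg
  | cons p rest ih =>
    obtain ⟨m, n⟩ := p
    rw [ciGroupRuns] at hg
    rcases hr : ciGroupRuns rest with _ | ⟨⟨m', ns⟩, gs⟩
    · rw [hr] at hg
      simp at hg
      simp [hg]
    · rw [hr] at hg
      dsimp only at hg
      by_cases hmm : m = m'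
      · rw [if_pos hmm] at hg
        rcases List.mem_cons.mp hg with h | h
        · simp [h]
        · have := ih g (hr ▸ List.mem_cons_of_mem _ h)
          simp [this]
      · rw [if_neg hmm] at hg
        rcases List.mem_cons.mp hg with h | h
        · simp [h]
        · have := ih g (hr ▸ h)
          simp [this]

lemma groupRuns_prepend (m : String) (ns : List String) (l : List (String × String))
    (hns : ns ≠ []) (hl : ∀ p ∈ l, p.1 ≠ m) :
    ciGroupRuns (ns.map (fun n => (m, n)) ++ l) = (m, ns) :: ciGroupRuns l := by
  induction ns with
  | nil => exact absurd rfl hns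
  | cons n rest ih =>
    cases rest with
    | nil =>
      simp only [List.map_cons, List.map_nil, List.nil_append, List.cons_append]
      rw [ciGroupRuns]
      rcases hr : ciGroupRuns l with _ | ⟨⟨m', ns'⟩, gs⟩
      · rfl
      · have : m' ∈ l.map Prod.fst := fst_mem_groupRuns l (m', ns') (hr ▸ List.mem_cons_self)
        obtain ⟨p, hp, hpe⟩ := List.mem_map.mp this
        have hne : m ≠ m' := fun he => hl p hp (hpe.trans he.symm)
        dsimp only
        rw [if_neg hne]
    | cons b t =>
      simp only [List.map_cons, List.cons_append] at ih ⊢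
      rw [ciGroupRuns, ih (by simp)]
      simp

lemma mem_expand (g : List (String × List String)) (x : String × String) :
    x ∈ ciExpand g ↔ ∃ a ∈ g, a.1 = x.1 ∧ x.2 ∈ a.2 := by
  unfold ciExpand
  simp only [List.mem_flatMap, List.mem_map]
  constructor
  · rintro ⟨a, ha, n, hn, rfl⟩; exact ⟨a, ha, rfl, hn⟩
  · rintro ⟨a, ha, h1, h2⟩
    exact ⟨a, ha, x.2, h2, by rw [h1]⟩

lemma groupRuns_expand (g : List (String × List String))
    (hne : ∀ x ∈ g, x.2 ≠ []) (hd : g.Pairwise (fun a b => a.1 ≠ b.1)) :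
    ciGroupRuns (ciExpand g) = g := by
  induction g with
  | nil => rfl
  | cons a gs ih =>
    obtain ⟨m, ns⟩ := a
    have hexp : ciExpand ((m, ns) :: gs) = ns.map (fun n => (m, n)) ++ ciExpand gs := by
      unfold ciExpand; simp
    rw [hexp, groupRuns_prepend m ns (ciExpand gs) (hne (m, ns) List.mem_cons_self) ?hl]
    · rw [ih (fun x hx => hne x (List.mem_cons_of_mem _ hx)) (List.Pairwise.sublist (by simp) hd)]
    case hl =>
      intro p hp
      obtain ⟨b, hb, h1, _⟩ := (mem_expand gs p).mp hp
      have := (List.pairwise_cons.mp hd).1 b hb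
      rw [← h1]
      exact fun he => this he.symm

lemma lex_cmp_eq (a b : String × String) :
    (decide (a.1 < b.1) || (!decide (b.1 < a.1) && decide (a.2 < b.2)))
      = decide ((toLex a : String ×ₗ String) < toLex b) := by
  rcases lt_trichotomy a.1 b.1 with h | h | h
  · simp [Prod.Lex.lt_iff, h]
  · simp [Prod.Lex.lt_iff, h]
  · simp [Prod.Lex.lt_iff, h, lt_asymm h, h.ne']

lemma sorted2_eq_sorted_lex (xs : List (String × String)) :
    PySem.List.sorted2 xs Prod.fst Prod.snd false
      = PySem.List.sorted xs (fun x => (toLex x : String ×ₗ String)) false := by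
  rw [PySem.List.sorted2.eq_1, PySem.List.sorted.eq_1]
  simp only [Bool.false_eq_true, if_false]
  congr 1
  funext acc x
  congr 1
  funext a b
  exact lex_cmp_eq a b

lemma mem_names (prs : List (String × String)) (m n : String) :
    n ∈ PySem.List.sorted (ciNames prs m) (fun x => x) false ↔ (m, n) ∈ prs := by
  rw [PySem.List.mem_sorted]
  unfold ciNames
  rw [PySem.Set.mem_ofList]
  simp only [List.mem_map, List.mem_filter, beq_iff_eq]
  constructor
  · rintro ⟨p, ⟨hp, h1⟩, h2⟩
    have : p = (m, n) := Prod.ext h1 h2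
    exact this ▸ hp
  · intro h
    exact ⟨(m, n), ⟨h, rfl⟩, rfl⟩

lemma groupRuns_sorted2 (prs : List (String × String)) :
    ciGroupRuns (PySem.List.sorted2 (PySem.Set.ofList prs) Prod.fst Prod.snd false)
      = (PySem.List.sorted (PySem.Set.ofList (prs.map Prod.fst)) (fun x => x) false).map
          (fun m => (m, PySem.List.sorted (ciNames prs m) (fun x => x) false)) := by
  set M := PySem.List.sorted (PySem.Set.ofList (prs.map Prod.fst)) (fun x => x) false with hM
  set G := M.map (fun m => (m, PySem.List.sorted (ciNames prs m) (fun x => x) false)) with hG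
  have hMmem : ∀ m, m ∈ M ↔ m ∈ prs.map Prod.fst := by
    intro m
    rw [hM, PySem.List.mem_sorted, PySem.Set.mem_ofList]
  have hMlt : M.Pairwise (· < ·) := PySem.List.sorted_ofList_pairwise_lt _
  have hne : ∀ x ∈ G, x.2 ≠ [] := by
    intro x hx
    rw [hG] at hx
    obtain ⟨m', hm', he⟩ := List.mem_map.mp hx
    subst he
    dsimp only
    obtain ⟨p, hp, hpe⟩ := List.mem_map.mp ((hMmem m').mp hm')
    intro hnil
    have hmem : (m', p.2) ∈ prs := by rw [← hpe, Prod.mk.eta]; exact hp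
    have : p.2 ∈ PySem.List.sorted (ciNames prs m') (fun x => x) false :=
      (mem_names prs m' p.2).mpr hmem
    rw [hnil] at this
    exact List.not_mem_nil this
  have hd : G.Pairwise (fun a b => a.1 ≠ b.1) := by
    rw [hG, List.pairwise_map]
    exact hMlt.imp (fun h => ne_of_lt h)
  have hpair : (ciExpand G).Pairwise
      (fun a b => (toLex a : String ×ₗ String) < toLex b) := by
    unfold ciExpand
    rw [List.pairwise_flatMap]
    constructor
    · intro x hx
      rw [hG] at hx
      obtain ⟨m', hm', he⟩ := List.mem_map.mp hx
      subst he
      dsimp only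
      rw [List.pairwise_map]
      have hsrt := PySem.List.sorted_ofList_pairwise_lt
        ((prs.filter (fun p => p.1 == m')).map Prod.snd)
      refine List.Pairwise.imp ?_ hsrt
      intro a b hab
      exact Prod.Lex.lt_iff.mpr (Or.inr ⟨rfl, hab⟩)
    · rw [hG, List.pairwise_map]
      refine hMlt.imp ?_
      intro a b hab x hx y hy
      simp only [List.mem_map] at hx hy
      obtain ⟨n, _, rfl⟩ := hx
      obtain ⟨n', _, rfl⟩ := hy
      exact Prod.Lex.lt_iff.mpr (Or.inl hab)
  have hnodup : (ciExpand G).Nodup :=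
    hpair.imp (fun {a b} h he => absurd (he ▸ h) (lt_irrefl _))
  have hmem : ∀ x, x ∈ ciExpand G ↔ x ∈ PySem.Set.ofList prs := by
    intro x
    rw [PySem.Set.mem_ofList, mem_expand]
    constructor
    · rintro ⟨a, ha, h1, h2⟩
      rw [hG] at ha
      obtain ⟨m', hm', he⟩ := List.mem_map.mp ha
      subst he
      dsimp only at h1 h2
      have := (mem_names prs m' x.2).mp h2
      rw [h1] at this
      rwa [Prod.mk.eta] at this
    · intro hx
      refine ⟨(x.1, PySem.List.sorted (ciNames prs x.1) (fun x => x) false), ?_, rfl, ?_⟩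
      · rw [hG]
        exact List.mem_map_of_mem ((hMmem x.1).mpr (List.mem_map_of_mem hx))
      · exact (mem_names prs x.1 x.2).mpr (by rwa [Prod.mk.eta])
  have hperm : (ciExpand G).Perm (PySem.Set.ofList prs) :=
    (List.perm_ext_iff_of_nodup hnodup (PySem.Set.nodup_ofList prs)).mpr hmem
  rw [sorted2_eq_sorted_lex,
    PySem.List.sorted_eq_of_perm_of_pairwise_lt _ _ _ hperm hpair,
    groupRuns_expand G hne hd]

lemma ci_main (imports : List String) :
    consolidate_imports imports = consolidate_imports_alt imports := by
  unfold consolidate_imports consolidate_imports_alt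
  dsimp only
  rw [foldA_eq]
  simp only [List.filterMap_map, List.flatMap_map]
  have hreg : ((fun ip : String × Option (List (String × String)) =>
      if (PySem.Str.startswith ip.1 "from " && ip.2.isNone)
          || (!PySem.Str.startswith ip.1 "from " && PySem.Str.startswith ip.1 "import ")
      then some ip.1 else none) ∘ (fun imp =>
        (imp, if PySem.Str.startswith imp "from " then ciParseFrom imp else none)))
      ∘ PySem.Str.strip = ciRegSel := by
    funext imp0
    simp only [Function.comp_apply]
    rfl
  have hpair : (fun a => (if PySem.Str.startswith (PySem.Str.strip a) "from "
      then ciParseFrom (PySem.Str.strip a) else none).getD []) = ciPairSel := by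
    funext a
    rfl
  rw [hreg, hpair, PySem.Set.update_empty]
  have hkeys : ((imports.flatMap ciPairSel).foldl ciStepD PySem.Dict.empty).keys
      = PySem.Set.ofList ((imports.flatMap ciPairSel).map Prod.fst) := by
    have h := PySem.Dict.keys_foldl_modify_key (imports.flatMap ciPairSel) Prod.fst
      PySem.Set.empty (fun _ x s => PySem.Set.add s x.2) PySem.Dict.empty
    simpa [PySem.Dict.keys_empty, PySem.Set.update_nil_left] using h
  have hgetD : ∀ m, ((imports.flatMap ciPairSel).foldl ciStepD PySem.Dict.empty).getD m
      PySem.Set.empty = ciNames (imports.flatMap ciPairSel) m := by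
    intro m
    rw [getD_foldD]
    rw [PySem.Dict.getD_empty]
    exact PySem.Set.update_empty _
  simp only [hkeys, hgetD]
  rw [groupRuns_sorted2]
  simp only [List.map_map]
  congr 1

-- ===== VERDICT (by name: the statement is the Claim_ definition above) =====
theorem consolidate_imports_spec : Claim_equal_consolidate_imports := by
  intro imports _
  exact ci_main imports
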